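-- pv_equiv track=rewrite | github.com/Jiw00n/bayes_analytic | gallery/symbolic_transform_steps.py | _needs_parens_for_mul
-- ===== SOURCE A (Python) =====
-- def _needs_parens_for_mul(s):
--     """문자열 expression이 mul에서 사용될 때 괄호가 필요한지 판단.
--     최외곽 레벨에서 + 또는 - 연산자가 있으면 True."""
--     if not isinstance(s, str):
--         return False
--     depth = 0
--     i = 0
--     while i < len(s):
--         c = s[i]
--         if c == '(':
--             depth += 1
--         elif c == ')':
--             depth -= 1
--         elif depth == 0 and c == '+':
--             return True
--         elif depth == 0 and c == '-' and i > 0 and s[i-1] == ' ':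
--             return True
--         i += 1
--     return False
-- ===== SOURCE B (Python) =====
-- def _needs_parens_for_mul(s):
--     """Same decision, no running state: a char triggers parens iff its prefix has
--     balanced parens (equal counts) and it is '+', or '-' preceded by a space."""
--     if not isinstance(s, str):
--         return False
--     return any(
--         s[:i].count('(') == s[:i].count(')')
--         and (c == '+' or (c == '-' and i > 0 and s[i - 1] == ' '))
--         for i, c in enumerate(s)
--     )
-- ===== Notes on version B (the rewrite author's own statement) =====
-- stated objective: alternative
-- what changed: Replaces A's stateful while-loop (running depth counter, index stepping, early returns) with a single stateless any() over enumerate that judges each character by comparing the open- and close-paren counts of its prefix.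
import Mathlib
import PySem

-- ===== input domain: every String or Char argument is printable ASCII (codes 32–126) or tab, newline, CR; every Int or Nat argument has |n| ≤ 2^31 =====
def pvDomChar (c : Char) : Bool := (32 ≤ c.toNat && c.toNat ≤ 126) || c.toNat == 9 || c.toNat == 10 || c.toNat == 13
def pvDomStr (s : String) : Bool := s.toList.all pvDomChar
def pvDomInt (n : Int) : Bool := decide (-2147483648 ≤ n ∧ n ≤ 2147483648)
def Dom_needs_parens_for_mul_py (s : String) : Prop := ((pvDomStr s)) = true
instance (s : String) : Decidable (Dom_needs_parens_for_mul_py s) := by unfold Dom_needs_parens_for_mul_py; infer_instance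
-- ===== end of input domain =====

-- B replaces A's stateful while-loop (running depth counter, early returns) by a single
-- stateless any() over enumerate, judging each char by the open/close paren counts of its prefix
-- (alternative decomposition; B is quadratic, not faster).

-- ===== PORT A =====
-- A's while loop: running depth, index i; prev carries s[i-1] (none ⟺ i = 0).
def pvALoop (l : List Char) (depth : Int) (prev : Option Char) : Bool :=
  match l with
  | [] => false
  | c :: rest =>
    if c = '(' then pvALoop rest (depth + 1) (some c)
    else if c = ')' then pvALoop rest (depth - 1) (some c)
    else if depth = 0 ∧ c = '+' then true
    else if depth = 0 ∧ c = '-' ∧ prev = some ' ' then true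
    else pvALoop rest depth (some c)

def needs_parens_for_mul_py (s : String) : Bool := pvALoop s.toList 0 none

-- ===== PORT B =====
-- Source B: any(s[:i].count('(') == s[:i].count(')') and (c=='+' or (c=='-' and i>0 and s[i-1]==' '))
--       for i, c in enumerate(s))
def needs_parens_for_mul_py_alt (s : String) : Bool :=
  (PySem.List.enumerate s.toList 0).any fun ic =>
    decide ((s.toList.take ic.1.toNat).count '(' = (s.toList.take ic.1.toNat).count ')')
    && (ic.2 == '+'
        || (ic.2 == '-' && decide (0 < ic.1) && s.toList[(ic.1 - 1).toNat]? == some ' '))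

-- ===== PRECONDITION & SPEC =====
def Spec_needs_parens_for_mul_py (s : String) (out : Bool) : Prop := out = needs_parens_for_mul_py_alt s
instance (s : String) (out : Bool) : Decidable (Spec_needs_parens_for_mul_py s out) := by unfold Spec_needs_parens_for_mul_py; infer_instance

-- ===== CLAIM (what is proved, stated in full; the proofs are below) =====
def Claim_equal_needs_parens_for_mul_py : Prop := ∀ (s : String), Dom_needs_parens_for_mul_py s → Spec_needs_parens_for_mul_py s (needs_parens_for_mul_py s)

-- ===== LEMMAS AND PROOFS =====

-- the per-char test B applies, at global index i of the full list L
def pvF (L : List Char) (ic : Int × Char) : Bool :=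
  decide ((L.take ic.1.toNat).count '(' = (L.take ic.1.toNat).count ')')
  && (ic.2 == '+'
      || (ic.2 == '-' && decide (0 < ic.1) && L[(ic.1 - 1).toNat]? == some ' '))

lemma pvMain (l pre : List Char) :
    pvALoop l ((pre.count '(' : Int) - (pre.count ')' : Int)) pre.getLast? =
      (PySem.List.enumerate l (pre.length : Int)).any (pvF (pre ++ l)) := by
  induction l generalizing pre with
  | nil => simp [pvALoop, PySem.List.enumerate_nil]
  | cons c rest ih =>
    rw [PySem.List.enumerate_cons, List.any_cons]
    have hlen : ((pre.length : Int)).toNat = pre.length := by omega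
    have htake : (pre ++ c :: rest).take pre.length = pre := by
      simp
    have hdep : (decide ((((pre ++ c :: rest).take ((pre.length : Int)).toNat).count '(')
        = (((pre ++ c :: rest).take ((pre.length : Int)).toNat).count ')')))
        = decide ((pre.count '(' : Int) - (pre.count ')' : Int) = 0) := by
      rw [hlen, htake]
      by_cases h : pre.count '(' = pre.count ')'
      · simp [h]
      · simp [h]; omega
    have hprev : (decide (0 < (pre.length : Int))
          && ((pre ++ c :: rest)[(((pre.length : Int)) - 1).toNat]? == some ' '))
        = (pre.getLast? == some ' ') := by
      cases pre with
      | nil => simp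
      | cons p ps =>
        have h1 : ((((p :: ps).length : Int)) - 1).toNat = ps.length := by
          simp
        have h2 : ((p :: ps) ++ c :: rest)[ps.length]? = (p :: ps)[ps.length]? := by
          apply List.getElem?_append_left; simp
        have h3 : (p :: ps)[ps.length]? = (p :: ps).getLast? := by
          rw [List.getLast?_eq_getElem?]; simp
        have h4 : (decide (0 < (((p :: ps).length : Int)))) = true := by simp
        rw [h1, h2, h3, h4, Bool.true_and]
    have hpre' : pre ++ c :: rest = (pre ++ [c]) ++ rest := by simp
    have hstart : (pre.length : Int) + 1 = ((pre ++ [c]).length : Int) := by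
      simp
    have ihc := ih (pre ++ [c])
    by_cases hc : c = '('
    · subst hc
      have hf0 : pvF (pre ++ '(' :: rest) ((pre.length : Int), '(') = false := by
        simp [pvF]
      have hstep : pvALoop ('(' :: rest) ((pre.count '(' : Int) - (pre.count ')' : Int)) pre.getLast?
          = pvALoop rest ((pre.count '(' : Int) - (pre.count ')' : Int) + 1) (some '(') := by
        rw [pvALoop, if_pos rfl]
      have harg : ((pre ++ ['(']).count '(' : Int) - ((pre ++ ['(']).count ')' : Int)
          = (pre.count '(' : Int) - (pre.count ')' : Int) + 1 := by
        simp [List.count_append]; omega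
      have hlast : (pre ++ ['(']).getLast? = some '(' := by simp
      rw [hf0, Bool.false_or, hstep, hpre', hstart, ← ihc, harg, hlast]
    · by_cases hc2 : c = ')'
      · subst hc2
        have hf0 : pvF (pre ++ ')' :: rest) ((pre.length : Int), ')') = false := by
          simp [pvF]
        have hstep : pvALoop (')' :: rest) ((pre.count '(' : Int) - (pre.count ')' : Int)) pre.getLast?
            = pvALoop rest ((pre.count '(' : Int) - (pre.count ')' : Int) - 1) (some ')') := by
          rw [pvALoop, if_neg (by decide), if_pos rfl]
        have harg : ((pre ++ [')']).count '(' : Int) - ((pre ++ [')']).count ')' : Int)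
            = (pre.count '(' : Int) - (pre.count ')' : Int) - 1 := by
          simp [List.count_append]; omega
        have hlast : (pre ++ [')']).getLast? = some ')' := by simp
        rw [hf0, Bool.false_or, hstep, hpre', hstart, ← ihc, harg, hlast]
      · have hf : pvF (pre ++ c :: rest) ((pre.length : Int), c)
            = (decide ((pre.count '(' : Int) - (pre.count ')' : Int) = 0)
               && (c == '+' || (c == '-' && (pre.getLast? == some ' ')))) := by
          unfold pvF
          rw [hdep]
          congr 1
          congr 1
          rw [Bool.and_assoc, hprev]
        have harg : ((pre ++ [c]).count '(' : Int) - ((pre ++ [c]).count ')' : Int)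
            = (pre.count '(' : Int) - (pre.count ')' : Int) := by
          simp [List.count_append, hc, hc2]
        have hlast : (pre ++ [c]).getLast? = some c := by simp
        rw [hf, pvALoop, if_neg hc, if_neg hc2]
        by_cases hd : (pre.count '(' : Int) - (pre.count ')' : Int) = 0
        · by_cases hp : c = '+'
          · subst hp
            rw [if_pos ⟨hd, rfl⟩]
            simp [hd]
          · by_cases hm : c = '-' ∧ pre.getLast? = some ' '
            · rw [if_neg (by tauto), if_pos ⟨hd, hm.1, hm.2⟩]
              simp [hd, hm.1, hm.2]
            · rw [if_neg (by tauto), if_neg (by tauto)]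
              have hfalse : (c == '+' || (c == '-' && (pre.getLast? == some ' '))) = false := by
                rcases Decidable.not_and_iff_not_or_not.mp hm with h | h
                · cases h' : (c == '-') with
                  | true => exact absurd (by simpa using h') h
                  | false => simp [hp]
                · simp [hp]
                  intro _
                  simpa using h
              rw [hfalse, Bool.and_false, Bool.false_or, hpre', hstart, ← ihc, harg, hlast]
        · rw [if_neg (by tauto), if_neg (by tauto), decide_eq_false hd, Bool.false_and,
            Bool.false_or, hpre', hstart, ← ihc, harg, hlast]

-- ===== VERDICT (by name: the statement is the Claim_ definition above) =====
theorem needs_parens_for_mul_py_spec : Claim_equal_needs_parens_for_mul_py := by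
  intro s _
  unfold Spec_needs_parens_for_mul_py needs_parens_for_mul_py needs_parens_for_mul_py_alt
  have h := pvMain s.toList []
  simp only [List.count_nil, Nat.cast_zero, sub_zero, List.getLast?_nil, List.nil_append,
    List.length_nil, Nat.cast_zero] at h
  exact h
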